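-- pv_equiv track=rewrite | github.com/MrHamdulay/csc3-capstone | examples/data/Assignment_7/jstjoh004/push.py | push_up
-- ===== SOURCE A (Python) =====
-- def push_up (grid):
--     """merge grid values upwards"""
--     # go through grid column by column
--     for z in range(4):
--         # working with one column at a time
--         col = [0,0,0,0]
--         # unique values used to move the original values
--         unique = []
--
--         # take all the values in one column and puts them in a list
--         for a in range(4):
--             col[a] = grid[a][z]
--         # BUILD A BUFFER INTO THE LIST TO MAKE CHECKING EQUELNESS EASIER
--         col.append(0)
--         col.append(0)
--         col.append(0)
--         # checks equalness
--         for b in  range(3):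
--             if col[b] == col[b+1]:
--                 col[b] = 2*(int(col[b]))
--                 col[b+1] = 0
--
--             elif col[b] == col[b+2] and col[b+1] == 0:
--                 col[b] = 2*(int(col[b]))
--                 col[b+2] = 0
--
--             elif col[b] == col[b+3] and col[b+2] == 0 and col[b+1] == 0:
--                 col[b] = 2*(int(col[b]))
--                 col[b+3] = 0
--         #take nonzero items out of the list
--         for c in range(4):
--             if col[c] != 0:
--                 unique.append(int(col[c]))
--                 col[c] = 0
--         # replace nonzero items from left to right in list
--         for d in range(len(unique)):
--             col[d] = unique[d]
--             #return the manipulated values to the column in the grid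
--         for e in range(4):
--             grid[e][z] = col[e]
--     return grid
-- ===== SOURCE B (Python) =====
-- def _merge_run(vals):
--     """merge adjacent equal values once, left to right"""
--     if not vals:
--         return []
--     if len(vals) >= 2 and vals[0] == vals[1]:
--         return [2 * int(vals[0])] + _merge_run(vals[2:])
--     return [int(vals[0])] + _merge_run(vals[1:])
--
-- def push_up(grid):
--     """merge grid values upwards"""
--     for z in range(4):
--         vals = [grid[a][z] for a in range(4) if grid[a][z] != 0]
--         merged = _merge_run(vals)
--         merged += [0] * (4 - len(merged))
--         for e in range(4):
--             grid[e][z] = merged[e]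
--     return grid
-- ===== Notes on version B (the rewrite author's own statement) =====
-- stated objective: simpler
-- what changed: A merges inside a 7-slot zero-padded buffer with gap-lookahead comparisons (distance 1, 2 and 3) and then compacts nonzero entries in a separate extract-and-rewrite pass; B first filters out the zeros of each column and then merges adjacent equal values in one recursive left-to-right pass, padding with zeros.
import Mathlib
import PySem

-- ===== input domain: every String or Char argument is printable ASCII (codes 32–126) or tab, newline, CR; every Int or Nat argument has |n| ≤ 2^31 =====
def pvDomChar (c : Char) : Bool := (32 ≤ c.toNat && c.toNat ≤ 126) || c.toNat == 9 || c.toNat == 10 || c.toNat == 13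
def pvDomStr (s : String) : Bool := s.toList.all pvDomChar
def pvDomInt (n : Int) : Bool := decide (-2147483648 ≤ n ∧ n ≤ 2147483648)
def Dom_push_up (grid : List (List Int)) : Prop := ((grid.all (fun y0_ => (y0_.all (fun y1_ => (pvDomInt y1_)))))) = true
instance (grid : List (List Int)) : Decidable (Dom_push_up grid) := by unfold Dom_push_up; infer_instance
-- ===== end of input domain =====

-- B replaces A's zero-buffer gap-lookahead merge plus separate extract-and-rewrite compaction by a
-- filter-the-zeros-then-merge-adjacent pass (simpler). Both Pythons mutate grid's rows in place and
-- return the same object; the equivalence proved here is about the returned value (equal to the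
-- mutated grid in both).

-- grid[a][z] for the in-range non-negative indices admitted by Pre_ (exact there; Python raises out of range)
def pvCell (g : List (List Int)) (a z : Nat) : Int := (g.getD a []).getD z 0
-- grid[e][z] = v for in-range non-negative indices (exact under Pre_)
def pvSetCell (g : List (List Int)) (e z : Nat) (v : Int) : List (List Int) :=
  g.set e ((g.getD e []).set z v)

-- ===== PORT A =====
-- one step of A's 'checks equalness' loop body (int() is the identity on Int)
def pvMergeStepA (col : List Int) (b : Nat) : List Int :=
  if col.getD b 0 = col.getD (b+1) 0 then
    (col.set b (2 * col.getD b 0)).set (b+1) 0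
  else if col.getD b 0 = col.getD (b+2) 0 ∧ col.getD (b+1) 0 = 0 then
    (col.set b (2 * col.getD b 0)).set (b+2) 0
  else if col.getD b 0 = col.getD (b+3) 0 ∧ col.getD (b+2) 0 = 0 ∧ col.getD (b+1) 0 = 0 then
    (col.set b (2 * col.getD b 0)).set (b+3) 0
  else col

-- A's extraction of nonzero entries ('unique') and left-to-right rewrite
def pvTailA (col : List Int) : List Int :=
  let p := (PySem.List.pyRange 0 4 1).foldl
    (fun (p : List Int × List Int) c =>
      if p.1.getD c.toNat 0 ≠ 0 then (p.1.set c.toNat 0, p.2 ++ [p.1.getD c.toNat 0]) else p)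
    (col, [])
  (PySem.List.pyRange 0 (p.2.length : Int) 1).foldl
    (fun col d => col.set d.toNat (p.2.getD d.toNat 0)) p.1

-- A's per-column work on the buffered column list (merge loop, then extraction and rewrite)
def pvColA (col : List Int) : List Int :=
  pvTailA ((PySem.List.pyRange 0 3 1).foldl (fun col b => pvMergeStepA col b.toNat) col)

def push_up (grid : List (List Int)) : List (List Int) :=
  (PySem.List.pyRange 0 4 1).foldl (fun g z =>
    let col := (PySem.List.pyRange 0 4 1).foldl
      (fun col a => col.set a.toNat (pvCell g a.toNat z.toNat)) [0, 0, 0, 0]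
    let col := ((col ++ [0]) ++ [0]) ++ [0]
    let col := pvColA col
    (PySem.List.pyRange 0 4 1).foldl
      (fun g e => pvSetCell g e.toNat z.toNat (col.getD e.toNat 0)) g) grid

-- ===== PORT B =====
-- B's recursive one-pass merge of adjacent equal values
def pvMergeRun : List Int → List Int
  | [] => []
  | [x] => [x]
  | x :: y :: rest => if x = y then (2 * x) :: pvMergeRun rest else x :: pvMergeRun (y :: rest)

def push_up_alt (grid : List (List Int)) : List (List Int) :=
  (PySem.List.pyRange 0 4 1).foldl (fun g z =>
    let vals := ((PySem.List.pyRange 0 4 1).map (fun a => pvCell g a.toNat z.toNat)).filter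
      (fun v => v ≠ 0)
    let merged := pvMergeRun vals
    let merged := merged ++ List.replicate (4 - merged.length) 0
    (PySem.List.pyRange 0 4 1).foldl
      (fun g e => pvSetCell g e.toNat z.toNat (merged.getD e.toNat 0)) g) grid

-- ===== PRECONDITION & SPEC =====
-- Pre_: A indexes grid[a][z] for a,z in 0..3, so it raises IndexError unless the grid has at
-- least 4 rows and each of the first 4 rows has at least 4 entries.
def Pre_push_up (grid : List (List Int)) : Prop :=
  4 ≤ grid.length ∧ ∀ r ∈ grid.take 4, 4 ≤ r.length
instance (grid : List (List Int)) : Decidable (Pre_push_up grid) := by unfold Pre_push_up; infer_instance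

def pvWitness_push_up : List (List Int) :=
  [[2, 0, 2, 4], [2, 2, 0, 4], [0, 2, 2, 0], [4, 0, 2, 4]]

def Spec_push_up (grid : List (List Int)) (out : List (List Int)) : Prop := out = push_up_alt grid
instance (grid : List (List Int)) (out : List (List Int)) : Decidable (Spec_push_up grid out) := by unfold Spec_push_up; infer_instance

-- ===== CLAIM (what is proved, stated in full; the proofs are below) =====
def Claim_equal_push_up : Prop := ∀ (grid : List (List Int)), Dom_push_up grid → Pre_push_up grid → Spec_push_up grid (push_up grid)

-- ===== LEMMAS AND PROOFS =====

lemma pr1 : PySem.List.pyRange 0 1 1 = [0] := by decide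
lemma pr2 : PySem.List.pyRange 0 2 1 = [0,1] := by decide
lemma pr3 : PySem.List.pyRange 0 3 1 = [0,1,2] := by decide
lemma pr4 : PySem.List.pyRange 0 4 1 = [0,1,2,3] := by decide

lemma mstep0 (x0 x1 x2 x3 x4 x5 x6 : Int) : pvMergeStepA [x0,x1,x2,x3,x4,x5,x6] 0 =
    if x0 = x1 then [2*x0,0,x2,x3,x4,x5,x6]
    else if x0 = x2 ∧ x1 = 0 then [2*x0,x1,0,x3,x4,x5,x6]
    else if x0 = x3 ∧ x2 = 0 ∧ x1 = 0 then [2*x0,x1,x2,0,x4,x5,x6]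
    else [x0,x1,x2,x3,x4,x5,x6] := by
  simp [pvMergeStepA, List.getD]

lemma mstep1 (x0 x1 x2 x3 x4 x5 x6 : Int) : pvMergeStepA [x0,x1,x2,x3,x4,x5,x6] 1 =
    if x1 = x2 then [x0,2*x1,0,x3,x4,x5,x6]
    else if x1 = x3 ∧ x2 = 0 then [x0,2*x1,x2,0,x4,x5,x6]
    else if x1 = x4 ∧ x3 = 0 ∧ x2 = 0 then [x0,2*x1,x2,x3,0,x5,x6]
    else [x0,x1,x2,x3,x4,x5,x6] := by
  simp [pvMergeStepA, List.getD]

lemma mstep2 (x0 x1 x2 x3 x4 x5 x6 : Int) : pvMergeStepA [x0,x1,x2,x3,x4,x5,x6] 2 =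
    if x2 = x3 then [x0,x1,2*x2,0,x4,x5,x6]
    else if x2 = x4 ∧ x3 = 0 then [x0,x1,2*x2,x3,0,x5,x6]
    else if x2 = x5 ∧ x4 = 0 ∧ x3 = 0 then [x0,x1,2*x2,x3,x4,0,x6]
    else [x0,x1,x2,x3,x4,x5,x6] := by
  simp [pvMergeStepA, List.getD]

set_option maxHeartbeats 1000000 in
lemma tailA_eq (x0 x1 x2 x3 : Int) : pvTailA [x0,x1,x2,x3,0,0,0] =
    (([x0,x1,x2,x3].filter (fun v => v ≠ 0)) ++
      List.replicate (4 - (([x0,x1,x2,x3].filter (fun v => v ≠ 0))).length) 0) ++ [0,0,0] := by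
  by_cases h0 : x0 = 0 <;> by_cases h1 : x1 = 0 <;> by_cases h2 : x2 = 0 <;> by_cases h3 : x3 = 0 <;>
    simp_all [pvTailA, pr1, pr2, pr3, pr4, List.foldl, List.getD]

set_option maxHeartbeats 4000000 in
set_option maxRecDepth 8000 in
lemma pvColA_eq (c0 c1 c2 c3 : Int) :
    pvColA [c0, c1, c2, c3, 0, 0, 0] =
      (pvMergeRun (([c0, c1, c2, c3]).filter (fun v => v ≠ 0)) ++
        List.replicate (4 - (pvMergeRun (([c0, c1, c2, c3]).filter (fun v => v ≠ 0))).length) 0)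
        ++ [0, 0, 0] := by
  rw [pvColA, pr3]
  simp only [List.foldl_cons, List.foldl_nil, Int.reduceToNat]
  rw [mstep0]
  split_ifs <;> rw [mstep1] <;> split_ifs <;> rw [mstep2] <;> split_ifs <;> rw [tailA_eq] <;>
    (try omega) <;>
    (by_cases hz0 : c0 = 0 <;> by_cases hz1 : c1 = 0 <;> by_cases hz2 : c2 = 0 <;>
      by_cases hz3 : c3 = 0 <;> (try subst_eqs) <;>
      (first
        | omega
        | (simp [pvMergeRun, *] <;> omega)
        | (simp_all [pvMergeRun] <;> omega)))

lemma getD_append_zeros (m : List Int) (e : Nat) :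
    (m ++ [0, 0, 0]).getD e 0 = m.getD e 0 := by
  rcases Nat.lt_or_ge e m.length with h | h
  · rw [List.getD_append _ _ _ _ h]
  · rw [List.getD_eq_default _ _ h]
    rcases Nat.exists_eq_add_of_le h with ⟨k, rfl⟩
    rw [List.getD_append_right _ _ _ _ (Nat.le_add_right _ _)]
    simp only [Nat.add_sub_cancel_left]
    rcases k with _ | _ | _ | k <;> simp [List.getD]

lemma step_eq (g : List (List Int)) (z : Int) :
    (let col := (PySem.List.pyRange 0 4 1).foldl
        (fun col a => col.set a.toNat (pvCell g a.toNat z.toNat)) [0, 0, 0, 0]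
     let col := ((col ++ [0]) ++ [0]) ++ [0]
     let col := pvColA col
     (PySem.List.pyRange 0 4 1).foldl
       (fun g e => pvSetCell g e.toNat z.toNat (col.getD e.toNat 0)) g) =
    (let vals := ((PySem.List.pyRange 0 4 1).map (fun a => pvCell g a.toNat z.toNat)).filter
        (fun v => v ≠ 0)
     let merged := pvMergeRun vals
     let merged := merged ++ List.replicate (4 - merged.length) 0
     (PySem.List.pyRange 0 4 1).foldl
       (fun g e => pvSetCell g e.toNat z.toNat (merged.getD e.toNat 0)) g) := by
  simp only [pr4, List.foldl, List.map_cons, List.map_nil, Int.reduceToNat, Int.toNat_zero,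
    Int.toNat_one, List.set_cons_zero, List.set_cons_succ, List.cons_append, List.nil_append]
  rw [pvColA_eq]
  simp only [getD_append_zeros]

-- ===== VERDICT (by name: the statement is the Claim_ definition above) =====
theorem push_up_spec : Claim_equal_push_up := by
  intro grid _ _
  unfold Spec_push_up push_up push_up_alt
  exact PySem.List.foldl_congr_mem _ _ _ _ (fun acc x _ => step_eq acc x)
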